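-- pv_equiv track=rewrite | github.com/brysonjones/open-value | src/open_value_estimator/eval.py | resolve_camera_view_keys
-- ===== SOURCE A (Python) =====
-- def resolve_camera_view_keys(
--     requested_views: list[str] | None,
--     available_keys: list[str],
-- ) -> list[str] | None:
--     """Resolve requested camera views to dataset keys.
--
--     Accepts either full feature keys (e.g., "observation.images.front")
--     or suffix names (e.g., "front").
--     """
--     if not requested_views:
--         return None
--
--     available_set = set(available_keys)
--     suffix_to_keys: dict[str, list[str]] = {}
--     for key in available_keys:
--         suffix = key.split("observation.images.", 1)[1] if key.startswith("observation.images.") else key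
--         suffix_to_keys.setdefault(suffix, []).append(key)
--
--     resolved: list[str] = []
--     unknown: list[str] = []
--     ambiguous: dict[str, list[str]] = {}
--
--     for view in requested_views:
--         if view in available_set:
--             resolved.append(view)
--             continue
--
--         matches = suffix_to_keys.get(view, [])
--         if len(matches) == 1:
--             resolved.append(matches[0])
--         elif len(matches) > 1:
--             ambiguous[view] = matches
--         else:
--             unknown.append(view)
--
--     if unknown or ambiguous:
--         parts: list[str] = []
--         if unknown:
--             parts.append(f"Unknown camera views: {unknown}.")
--         if ambiguous:
--             ambiguous_str = "; ".join(f"{k} -> {v}" for k, v in ambiguous.items())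
--             parts.append(f"Ambiguous camera views: {ambiguous_str}.")
--         parts.append(f"Available camera views: {available_keys}")
--         raise ValueError(" ".join(parts))
--
--     # Deduplicate while preserving user order
--     deduped: list[str] = []
--     seen: set[str] = set()
--     for key in resolved:
--         if key not in seen:
--             deduped.append(key)
--             seen.add(key)
--
--     return deduped
-- ===== SOURCE B (Python) =====
-- def resolve_camera_view_keys(
--     requested_views,
--     available_keys,
-- ):
--     """Resolve requested camera views to dataset keys.
--
--     Staged-pass formulation: compute each view's candidate keys with one unified
--     rule (a full-key match is its own sole candidate, otherwise every key with
--     that suffix), then partition/validate the pairs and dedupe via dict.fromkeys.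
--     """
--     if not requested_views:
--         return None
--
--     prefix = "observation.images."
--
--     def candidates(view):
--         if view in available_keys:
--             return [view]
--         return [k for k in available_keys
--                 if (k[len(prefix):] if k.startswith(prefix) else k) == view]
--
--     outcomes = [(view, candidates(view)) for view in requested_views]
--     unknown = [v for v, ms in outcomes if not ms]
--     ambiguous = {v: ms for v, ms in outcomes if len(ms) > 1}
--
--     if unknown or ambiguous:
--         parts = []
--         if unknown:
--             parts.append(f"Unknown camera views: {unknown}.")
--         if ambiguous:
--             ambiguous_str = "; ".join(f"{k} -> {v}" for k, v in ambiguous.items())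
--             parts.append(f"Ambiguous camera views: {ambiguous_str}.")
--         parts.append(f"Available camera views: {available_keys}")
--         raise ValueError(" ".join(parts))
--
--     return list(dict.fromkeys(ms[0] for _, ms in outcomes))
-- ===== Notes on version B (the rewrite author's own statement) =====
-- stated objective: alternative
-- what changed: B replaces A's build-suffix-index-then-classify loop with three accumulators by a staged pipeline: one candidates(view) rule unifying direct and suffix matching (a per-view scan, no precomputed index or availability set), comprehensions that partition the (view, candidates) pairs into unknown/ambiguous, and dict.fromkeys for the order-preserving dedupe instead of A's seen-set loop.
import Mathlib
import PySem

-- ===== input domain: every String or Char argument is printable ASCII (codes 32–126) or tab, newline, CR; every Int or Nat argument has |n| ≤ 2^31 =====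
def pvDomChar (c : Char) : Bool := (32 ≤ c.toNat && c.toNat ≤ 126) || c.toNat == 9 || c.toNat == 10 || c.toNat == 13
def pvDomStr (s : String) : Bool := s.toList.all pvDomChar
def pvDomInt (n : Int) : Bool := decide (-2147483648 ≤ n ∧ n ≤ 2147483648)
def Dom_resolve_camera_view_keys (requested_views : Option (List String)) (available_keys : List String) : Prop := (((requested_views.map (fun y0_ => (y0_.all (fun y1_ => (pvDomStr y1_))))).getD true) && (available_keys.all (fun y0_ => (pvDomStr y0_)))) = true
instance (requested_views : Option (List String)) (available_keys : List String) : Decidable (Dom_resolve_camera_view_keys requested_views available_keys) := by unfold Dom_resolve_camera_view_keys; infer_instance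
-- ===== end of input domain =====

-- B replaces A's suffix→keys index + three-accumulator classification loop by a staged
-- pipeline: one candidates(view) rule, comprehension partitions, dict.fromkeys dedupe
-- (objective: alternative). Where Python A raises ValueError both ports return none;
-- Pre_ excludes exactly those inputs.

-- ===== PORT A =====
def pvPrefix : String := "observation.images."

-- key.split("observation.images.", 1)[1] if key.startswith(...) else key
-- (index [1] always exists when startswith holds, so pyGetD is exact here)
def pvSuffixA (key : String) : String :=
  if PySem.Str.startswith key pvPrefix then
    PySem.List.pyGetD ((PySem.Str.splitMax? key pvPrefix 1).getD []) 1 ""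
  else key

def resolve_camera_view_keys (requested_views : Option (List String)) (available_keys : List String) : Option (List String) :=
  match requested_views with
  | none => none               -- `if not requested_views: return None`
  | some vs =>
    if vs.isEmpty then none else
    let available_set : PySem.Set String := PySem.Set.ofList available_keys
    let suffix_to_keys : PySem.Dict String (List String) :=
      available_keys.foldl (fun d key =>
        d.insert (pvSuffixA key) (d.getD (pvSuffixA key) [] ++ [key])) PySem.Dict.empty
    let st : List String × List String × PySem.Dict String (List String) :=
      vs.foldl (fun st view =>
        if PySem.Set.contains available_set view then
          (st.1 ++ [view], st.2.1, st.2.2)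
        else
          let ms := suffix_to_keys.getD view []
          if ms.length = 1 then (st.1 ++ [PySem.List.pyGetD ms 0 ""], st.2.1, st.2.2)
          else if ms.length > 1 then (st.1, st.2.1, st.2.2.insert view ms)
          else (st.1, st.2.1 ++ [view], st.2.2))
        ([], [], PySem.Dict.empty)
    if !st.2.1.isEmpty || !st.2.2.items.isEmpty then
      none                     -- `raise ValueError(...)` — excluded by Pre_
    else
      some (st.1.foldl (fun (p : List String × PySem.Set String) key =>
          if PySem.Set.contains p.2 key then p else (p.1 ++ [key], PySem.Set.add p.2 key))
        ([], PySem.Set.empty)).1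

-- ===== PORT B =====
-- k[len("observation.images."):] if k.startswith(...) else k
def pvSuffixB (key : String) : String :=
  if PySem.Str.startswith key pvPrefix then
    PySem.Str.slice key (some (PySem.Str.len pvPrefix)) none
  else key

-- candidates(view): itself if a full key, else every key with that suffix
def pvCandidates (available_keys : List String) (view : String) : List String :=
  if available_keys.contains view then [view]
  else available_keys.filter (fun k => pvSuffixB k == view)

def resolve_camera_view_keys_alt (requested_views : Option (List String)) (available_keys : List String) : Option (List String) :=
  match requested_views with
  | none => none               -- `if not requested_views: return None`
  | some vs =>
    if vs.isEmpty then none else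
    let outcomes : List (String × List String) :=
      vs.map (fun view => (view, pvCandidates available_keys view))
    let unknown : List String :=
      (outcomes.filter (fun p => p.2.isEmpty)).map (fun p => p.1)
    let ambiguous : PySem.Dict String (List String) :=
      outcomes.foldl (fun d p => if p.2.length > 1 then d.insert p.1 p.2 else d)
        PySem.Dict.empty
    if !unknown.isEmpty || !ambiguous.items.isEmpty then
      none                     -- `raise ValueError(...)` — excluded by Pre_
    else
      -- list(dict.fromkeys(ms[0] for _, ms in outcomes))
      some (PySem.List.dedup (outcomes.map (fun p => PySem.List.pyGetD p.2 0 "")))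

-- ===== PRECONDITION & SPEC =====
-- Pre_ excludes exactly the inputs on which Python A raises ValueError: some requested
-- view neither equals a full key nor equals the suffix of exactly one available key.
def Pre_resolve_camera_view_keys (requested_views : Option (List String)) (available_keys : List String) : Prop :=
  ∀ v ∈ requested_views.getD [], v ∈ available_keys ∨
      (available_keys.filter (fun k => pvSuffixB k == v)).length = 1
instance (requested_views : Option (List String)) (available_keys : List String) : Decidable (Pre_resolve_camera_view_keys requested_views available_keys) := by unfold Pre_resolve_camera_view_keys; infer_instance

def pvWitness_resolve_camera_view_keys : Option (List String) × List String :=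
  (some ["front", "observation.images.wrist"], ["observation.images.front", "observation.images.wrist"])

def Spec_resolve_camera_view_keys (requested_views : Option (List String)) (available_keys : List String) (out : Option (List String)) : Prop := out = resolve_camera_view_keys_alt requested_views available_keys
instance (requested_views : Option (List String)) (available_keys : List String) (out : Option (List String)) : Decidable (Spec_resolve_camera_view_keys requested_views available_keys out) := by unfold Spec_resolve_camera_view_keys; infer_instance

-- ===== CLAIM (what is proved, stated in full; the proofs are below) =====
def Claim_equal_resolve_camera_view_keys : Prop := ∀ (requested_views : Option (List String)) (available_keys : List String), Dom_resolve_camera_view_keys requested_views available_keys → Pre_resolve_camera_view_keys requested_views available_keys → Spec_resolve_camera_view_keys requested_views available_keys (resolve_camera_view_keys requested_views available_keys)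

-- ===== LEMMAS AND PROOFS =====

-- One unfolding of splitOnMax.go once maxsplit is exhausted.
lemma pvGoZero (sep : List Char) (fuel : Nat) (t cur : List Char) (acc : List (List Char)) :
    PySem.Chars.splitOnMax.go sep fuel 0 t cur acc = ((cur.reverse ++ t) :: acc).reverse := by
  rw [PySem.Chars.splitOnMax.go.eq_def]
  cases fuel with
  | zero => rfl
  | succ f => cases t with
    | nil => simp
    | cons c rest => simp

-- s.split(sep, 1) on a string that starts with sep yields ["", remainder].
lemma pvGoPrefix (sep t : List Char) (hs : sep ≠ []) :
    PySem.Chars.splitOnMax.go sep ((sep ++ t).length + 1) 1 (sep ++ t) [] [] = [[], t] := by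
  obtain ⟨c, ss, rfl⟩ : ∃ c ss, sep = c :: ss := by
    cases sep with
    | nil => exact absurd rfl hs
    | cons c ss => exact ⟨c, ss, rfl⟩
  rw [show ((c :: ss) ++ t) = c :: (ss ++ t) from rfl]
  rw [PySem.Chars.splitOnMax.go.eq_def]
  simp only [List.length_cons]
  have hp : (c :: ss).isPrefixOf (c :: (ss ++ t)) = true := by
    simp [List.isPrefixOf_iff_prefix]
  simp only [hp, if_true, one_ne_zero, if_false]
  have hd : List.drop (ss.length + 1) (c :: (ss ++ t)) = t := by
    rw [show (c :: (ss ++ t)) = (c :: ss) ++ t from rfl,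
        show ss.length + 1 = (c :: ss).length from rfl, List.drop_left]
  rw [hd, pvGoZero]
  simp

-- The two suffix extractions (split vs slice) agree on every string.
lemma pvSuffix_eq (key : String) : pvSuffixA key = pvSuffixB key := by
  unfold pvSuffixA pvSuffixB
  by_cases h : PySem.Str.startswith key pvPrefix = true
  · rw [if_pos h, if_pos h]
    have hpre : pvPrefix.toList <+: key.toList := by
      have hb : PySem.Chars.startswith key.toList pvPrefix.toList = true := by
        simpa [PySem.Str.startswith] using h
      exact (PySem.Chars.startswith_iff _ _).mp hb
    obtain ⟨t, ht⟩ := hpre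
    have hsep : pvPrefix.toList ≠ [] := by decide
    have hsOM : PySem.Chars.splitOnMax key.toList pvPrefix.toList 1 = [[], t] := by
      rw [← ht]
      unfold PySem.Chars.splitOnMax
      rw [if_neg (by norm_num)]
      simpa using pvGoPrefix _ t hsep
    have hsplit : PySem.Str.splitMax? key pvPrefix 1 =
        some [String.ofList [], String.ofList t] := by
      simp [PySem.Str.splitMax?, PySem.Chars.splitMax?, hsOM, hsep]
    rw [hsplit]
    have hslice : PySem.Str.slice key (some (PySem.Str.len pvPrefix)) none =
        String.ofList t := by
      simp only [PySem.Str.slice, PySem.Chars.slice]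
      rw [PySem.List.slice_from key.toList (by decide : (0:Int) ≤ PySem.Str.len pvPrefix)]
      rw [← ht, show (PySem.Str.len pvPrefix).toNat = pvPrefix.toList.length from by decide,
          List.drop_left]
    rw [hslice]
    simp [PySem.List.pyGetD]
  · rw [if_neg h, if_neg h]

-- A's suffix_to_keys index looked up at v is exactly the order-preserving scan of available_keys.
lemma pvDict_getD (xs : List String) (d : PySem.Dict String (List String)) (v : String) :
    (xs.foldl (fun d key => d.insert (pvSuffixA key) (d.getD (pvSuffixA key) [] ++ [key])) d).getD v []
      = d.getD v [] ++ xs.filter (fun k => pvSuffixB k == v) := by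
  induction xs generalizing d with
  | nil => simp
  | cons key xs ih =>
    simp only [List.foldl_cons, List.filter_cons]
    rw [ih]
    rw [PySem.Dict.getD_insert]
    by_cases hv : pvSuffixB key == v
    · have hv' : v = pvSuffixA key := by
        rw [pvSuffix_eq]; exact (eq_of_beq hv).symm
      simp [hv', pvSuffix_eq]
    · have hv' : ¬ (v = pvSuffixA key) := by
        rw [pvSuffix_eq]; intro he; exact hv (by simp [he])
      simp [hv', hv]

-- Proof-side canonical classification step (both programs' per-view behaviour).
def pvStep (available_keys : List String)
    (st : List String × List String × PySem.Dict String (List String)) (view : String) :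
    List String × List String × PySem.Dict String (List String) :=
  if (pvCandidates available_keys view).length = 1 then
    (st.1 ++ [PySem.List.pyGetD (pvCandidates available_keys view) 0 ""], st.2.1, st.2.2)
  else if (pvCandidates available_keys view).length > 1 then
    (st.1, st.2.1, st.2.2.insert view (pvCandidates available_keys view))
  else (st.1, st.2.1 ++ [view], st.2.2)

-- A's per-view step is the canonical step driven by pvCandidates.
lemma pvStepA_eq (available_keys : List String) :
    (fun (st : List String × List String × PySem.Dict String (List String)) view =>
        if PySem.Set.contains (PySem.Set.ofList available_keys) view then
          (st.1 ++ [view], st.2.1, st.2.2)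
        else
          let ms := (available_keys.foldl (fun d key =>
              d.insert (pvSuffixA key) (d.getD (pvSuffixA key) [] ++ [key])) PySem.Dict.empty).getD view []
          if ms.length = 1 then (st.1 ++ [PySem.List.pyGetD ms 0 ""], st.2.1, st.2.2)
          else if ms.length > 1 then (st.1, st.2.1, st.2.2.insert view ms)
          else (st.1, st.2.1 ++ [view], st.2.2))
    = pvStep available_keys := by
  funext st view
  have hc : PySem.Set.contains (PySem.Set.ofList available_keys) view = available_keys.contains view := by
    simp [PySem.Set.contains, PySem.Set.mem_ofList]
  have hm : (available_keys.foldl (fun d key =>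
      d.insert (pvSuffixA key) (d.getD (pvSuffixA key) [] ++ [key])) PySem.Dict.empty).getD view []
      = available_keys.filter (fun k => pvSuffixB k == view) := by
    rw [pvDict_getD]; rfl
  simp only [hc, hm]
  unfold pvStep pvCandidates
  by_cases h : available_keys.contains view = true
  · rw [if_pos h, if_pos h]; rfl
  · rw [if_neg h, if_neg h]

-- Closed form of A's three-accumulator classification fold via pvCandidates.
lemma pvFoldA (available_keys : List String) (vs : List String) (r u : List String)
    (d : PySem.Dict String (List String)) :
    vs.foldl (pvStep available_keys) (r, u, d)
    = (r ++ ((vs.map (fun v => (v, pvCandidates available_keys v))).filter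
              (fun p => p.2.length = 1)).map (fun p => PySem.List.pyGetD p.2 0 ""),
       u ++ ((vs.map (fun v => (v, pvCandidates available_keys v))).filter
              (fun p => p.2.isEmpty)).map (fun p => p.1),
       (vs.map (fun v => (v, pvCandidates available_keys v))).foldl
          (fun d p => if p.2.length > 1 then d.insert p.1 p.2 else d) d) := by
  induction vs generalizing r u d with
  | nil => simp
  | cons v vs ih =>
    simp only [List.foldl_cons, List.map_cons, List.filter_cons]
    rcases hlen : (pvCandidates available_keys v).length with _ | _ | n
    · -- no candidates: unknown
      have hs : pvStep available_keys (r, u, d) v = (r, u ++ [v], d) := by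
        unfold pvStep; rw [if_neg (by omega), if_neg (by omega)]
      have he : (pvCandidates available_keys v).isEmpty = true := by
        rw [List.isEmpty_iff_length_eq_zero, hlen]
      rw [hs, ih]
      simp [he]
    · -- exactly one candidate: resolved
      have hs : pvStep available_keys (r, u, d) v
          = (r ++ [PySem.List.pyGetD (pvCandidates available_keys v) 0 ""], u, d) := by
        unfold pvStep; rw [if_pos hlen]
      have he : (pvCandidates available_keys v).isEmpty = false := by
        rw [List.isEmpty_eq_false_iff_exists_mem]
        rcases List.exists_of_length_succ _ hlen with ⟨x, t, hxt⟩
        exact ⟨x, by rw [hxt]; exact List.mem_cons_self⟩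
      rw [hs, ih]
      simp [he]
    · -- more than one: ambiguous
      have hs : pvStep available_keys (r, u, d) v
          = (r, u, d.insert v (pvCandidates available_keys v)) := by
        unfold pvStep; rw [if_neg (by omega), if_pos (by omega)]
      have he : (pvCandidates available_keys v).isEmpty = false := by
        rw [List.isEmpty_eq_false_iff_exists_mem]
        rcases List.exists_of_length_succ _ hlen with ⟨x, t, hxt⟩
        exact ⟨x, by rw [hxt]; exact List.mem_cons_self⟩
      rw [hs, ih]
      simp [he]

-- Under Pre_, every candidate list has length exactly 1.
lemma pvCand_len (available_keys : List String) (v : String)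
    (h : v ∈ available_keys ∨ (available_keys.filter (fun k => pvSuffixB k == v)).length = 1) :
    (pvCandidates available_keys v).length = 1 := by
  unfold pvCandidates
  by_cases hc : available_keys.contains v = true
  · rw [if_pos hc]; rfl
  · rcases h with h | h
    · have hc' : available_keys.contains v = true := by simpa using h
      exact absurd hc' hc
    · rw [if_neg hc]; exact h

-- If no pair triggers an insert, the ambiguous fold is the identity.
lemma pvAmbFold_id (l : List (String × List String)) (d : PySem.Dict String (List String))
    (h : ∀ p ∈ l, ¬ p.2.length > 1) :
    l.foldl (fun d p => if p.2.length > 1 then d.insert p.1 p.2 else d) d = d := by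
  induction l generalizing d with
  | nil => rfl
  | cons p l ih =>
    simp only [List.foldl_cons]
    rw [if_neg (h p (by simp))]
    exact ih d (fun q hq => h q (by simp [hq]))

-- A's (deduped, seen-set) fold from equal components is the Set.add fold (= dedup).
lemma pvDedup_set (res : List String) (s : PySem.Set String) :
    ((res.foldl (fun (p : List String × PySem.Set String) key =>
        if PySem.Set.contains p.2 key then p else (p.1 ++ [key], PySem.Set.add p.2 key))
      (s, s)).1)
      = res.foldl PySem.Set.add s := by
  induction res generalizing s with
  | nil => rfl
  | cons key res ih =>
    simp only [List.foldl_cons]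
    by_cases h : PySem.Set.contains s key = true
    · rw [if_pos h]
      have hadd : PySem.Set.add s key = s := by
        unfold PySem.Set.add
        rw [if_pos (by simpa [PySem.Set.contains] using h)]
      rw [hadd]; exact ih s
    · rw [if_neg h]
      have hadd : PySem.Set.add s key = s ++ [key] := by
        unfold PySem.Set.add
        rw [if_neg (by simpa [PySem.Set.contains] using h)]
      rw [hadd]; exact ih (s ++ [key])

-- ===== VERDICT (by name: the statement is the Claim_ definition above) =====
theorem resolve_camera_view_keys_spec : Claim_equal_resolve_camera_view_keys := by
  intro requested_views available_keys _hdom hpre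
  unfold Spec_resolve_camera_view_keys
  unfold resolve_camera_view_keys resolve_camera_view_keys_alt
  match requested_views with
  | none => rfl
  | some vs =>
    simp only []
    by_cases hvs : vs.isEmpty
    · rw [if_pos hvs, if_pos hvs]
    · rw [if_neg hvs, if_neg hvs]
      have hall : ∀ v ∈ vs, (pvCandidates available_keys v).length = 1 := by
        intro v hv
        exact pvCand_len available_keys v (hpre v (by simpa using hv))
      rw [pvStepA_eq, pvFoldA]
      set outs := vs.map (fun v => (v, pvCandidates available_keys v)) with houts
      have hout1 : ∀ p ∈ outs, p.2.length = 1 := by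
        intro p hp
        rw [houts] at hp
        obtain ⟨v, hv, rfl⟩ := List.mem_map.mp hp
        exact hall v hv
      have hU : outs.filter (fun p => p.2.isEmpty) = [] := by
        rw [List.filter_eq_nil_iff]
        intro p hp
        have h1 := hout1 p hp
        simp only [List.isEmpty_iff]
        intro hnil
        rw [hnil] at h1
        simp at h1
      have hA : outs.foldl (fun d p => if p.2.length > 1 then d.insert p.1 p.2 else d)
          PySem.Dict.empty = PySem.Dict.empty := by
        apply pvAmbFold_id
        intro p hp
        have := hout1 p hp
        omega
      have hR : outs.filter (fun p => p.2.length = 1) = outs := by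
        rw [List.filter_eq_self]
        intro p hp
        simp [hout1 p hp]
      rw [hU, hA, hR]
      simp only [List.map_nil, List.append_nil, List.nil_append, List.isEmpty_nil,
        Bool.not_true, Bool.false_or]
      have hempty : (PySem.Dict.empty : PySem.Dict String (List String)).items = [] := rfl
      rw [hempty]
      simp only [List.isEmpty_nil, Bool.not_true]
      rw [if_neg (by simp)]
      congr 1
      rw [show (([], PySem.Set.empty) : List String × PySem.Set String)
            = ((PySem.Set.empty : PySem.Set String), (PySem.Set.empty : PySem.Set String)) from rfl,
          pvDedup_set]
      rw [PySem.List.dedup_eq_ofList, PySem.Set.ofList_eq_foldl]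
      rfl
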